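-- pv_equiv track=rewrite | github.com/BoA0107/Work | read_doc.py | make_dct
-- ===== SOURCE A (Python) =====
-- def make_dct(lst):
--     dct = {}
--     for i in range(len(lst)):
--         x, y = lst[i]
--         if y == None:
--             key = x
--             dct[key] = {}
--             for j in range(i + 1, len(lst)):
--                 x, y = lst[j]
--                 if y != None:
--                     dct[key][x] = y
--                 else:
--                     break
--     return dct
-- ===== SOURCE B (Python) =====
-- def make_dct(lst):
--     dct = {}
--     key = None
--     for x, y in lst:
--         if y == None:
--             key = x
--             dct[key] = {}
--         elif key is not None:
--             dct[key][x] = y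
--     return dct
-- ===== Notes on version B (the rewrite author's own statement) =====
-- stated objective: simpler
-- what changed: Replaces A's outer index loop with a rescanning inner break-loop over the tail by a single pass that keeps the current group key in a variable and writes each pair directly into that group's dict.
import Mathlib
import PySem

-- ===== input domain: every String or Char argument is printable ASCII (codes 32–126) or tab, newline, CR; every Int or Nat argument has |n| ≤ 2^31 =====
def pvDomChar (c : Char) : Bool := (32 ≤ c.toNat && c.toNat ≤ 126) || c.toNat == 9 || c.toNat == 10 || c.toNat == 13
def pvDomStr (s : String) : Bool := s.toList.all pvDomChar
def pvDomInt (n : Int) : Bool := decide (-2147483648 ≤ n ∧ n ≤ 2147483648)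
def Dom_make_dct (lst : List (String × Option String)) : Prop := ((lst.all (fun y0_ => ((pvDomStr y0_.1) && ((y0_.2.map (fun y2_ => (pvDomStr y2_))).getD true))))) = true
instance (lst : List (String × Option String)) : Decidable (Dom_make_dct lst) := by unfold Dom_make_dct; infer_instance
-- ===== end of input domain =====

-- B replaces the rescanning inner break-loop with a single pass carrying the current group key; objective: simpler.
-- ===== PORT A =====
def innerA_make_dct : List (String × Option String) → String → PySem.Dict String (PySem.Dict String String) → PySem.Dict String (PySem.Dict String String)
  | [], _, dct => dct
  | (x, y) :: rest, key, dct =>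
    match y with
    | some yv => innerA_make_dct rest key (dct.modify key PySem.Dict.empty (fun inner => inner.insert x yv))
    | none => dct

def goA_make_dct : List (String × Option String) → PySem.Dict String (PySem.Dict String String) → PySem.Dict String (PySem.Dict String String)
  | [], dct => dct
  | (x, y) :: rest, dct =>
    match y with
    | some _ => goA_make_dct rest dct
    | none =>
      let dct1 := dct.insert x PySem.Dict.empty
      let dct2 := innerA_make_dct rest x dct1
      goA_make_dct rest dct2

def make_dct (lst : List (String × Option String)) : List (String × List (String × String)) :=
  (goA_make_dct lst PySem.Dict.empty).items.map (fun p => (p.1, p.2.items))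

-- ===== PORT B =====
def stepB_make_dct (st : PySem.Dict String (PySem.Dict String String) × Option String)
    (p : String × Option String) : PySem.Dict String (PySem.Dict String String) × Option String :=
  match p with
  | (x, none) => (st.1.insert x PySem.Dict.empty, some x)
  | (x, some yv) =>
    match st.2 with
    | some key => (st.1.modify key PySem.Dict.empty (fun inner => inner.insert x yv), some key)
    | none => st

def make_dct_alt (lst : List (String × Option String)) : List (String × List (String × String)) :=
  ((lst.foldl stepB_make_dct (PySem.Dict.empty, none)).1).items.map (fun p => (p.1, p.2.items))

-- ===== PRECONDITION & SPEC =====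
def Spec_make_dct (lst : List (String × Option String)) (out : List (String × List (String × String))) : Prop := out = make_dct_alt lst
instance (lst : List (String × Option String)) (out : List (String × List (String × String))) : Decidable (Spec_make_dct lst out) := by unfold Spec_make_dct; infer_instance

-- ===== CLAIM (what is proved, stated in full; the proofs are below) =====
def Claim_equal_make_dct : Prop := ∀ (lst : List (String × Option String)), Dom_make_dct lst → Spec_make_dct lst (make_dct lst)

-- ===== LEMMAS AND PROOFS =====
lemma foldB_some_eq (l : List (String × Option String)) (key : String)
    (dct : PySem.Dict String (PySem.Dict String String)) :
    (l.foldl stepB_make_dct (dct, some key)).1 = goA_make_dct l (innerA_make_dct l key dct) := by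
  induction l generalizing key dct with
  | nil => rfl
  | cons hd rest ih =>
    obtain ⟨x, y⟩ := hd
    cases y with
    | some yv =>
      simp only [List.foldl_cons, stepB_make_dct, innerA_make_dct, goA_make_dct]
      exact ih key _
    | none =>
      simp only [List.foldl_cons, stepB_make_dct, innerA_make_dct, goA_make_dct]
      exact ih x _

lemma foldB_none_eq (l : List (String × Option String))
    (dct : PySem.Dict String (PySem.Dict String String)) :
    (l.foldl stepB_make_dct (dct, none)).1 = goA_make_dct l dct := by
  induction l generalizing dct with
  | nil => rfl
  | cons hd rest ih =>
    obtain ⟨x, y⟩ := hd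
    cases y with
    | some yv =>
      simp only [List.foldl_cons, stepB_make_dct, goA_make_dct]
      exact ih dct
    | none =>
      simp only [List.foldl_cons, stepB_make_dct, goA_make_dct]
      exact foldB_some_eq rest x _


-- ===== VERDICT (by name: the statement is the Claim_ definition above) =====
theorem make_dct_spec : Claim_equal_make_dct := by
  intro lst _
  unfold Spec_make_dct make_dct make_dct_alt
  rw [foldB_none_eq]
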